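-- pv_equiv track=rewrite | github.com/aldo-git-bit/predicting-tashlhiyt-plural | scripts/ngram_feature_selection/ngram_extractor.py | extract_final_ngrams
-- ===== SOURCE A (Python) =====
-- def extract_final_ngrams(phonemes, max_n=3):
--     """
--     Extract final n-grams from a phoneme list.
--
--     Args:
--         phonemes (list): List of phonemes (e.g., ['k', 'r', 'a', 't'])
--         max_n (int): Maximum n-gram size (default: 3)
--
--     Returns:
--         list: Final n-grams with $ marker (e.g., ['t$', 'at$', 'rat$'])
--
--     Examples:
--         >>> extract_final_ngrams(['k', 'r', 'a', 't'])
--         ['t$', 'at$', 'rat$']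
--
--         >>> extract_final_ngrams(['a', 'f', 'u', 's'])
--         ['s$', 'us$', 'fus$']
--     """
--     if not phonemes:
--         return []
--
--     ngrams = []
--     for n in range(1, min(max_n + 1, len(phonemes) + 1)):
--         ngram = ''.join(phonemes[-n:])
--         ngrams.append(f'{ngram}$')
--
--     return ngrams
-- ===== SOURCE B (Python) =====
-- def extract_final_ngrams(phonemes, max_n=3):
--     suffix = ''
--     ngrams = []
--     for i in range(min(max_n, len(phonemes))):
--         suffix = phonemes[len(phonemes) - 1 - i] + suffix
--         ngrams.append(suffix + '$')
--     return ngrams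
-- ===== Notes on version B (the rewrite author's own statement) =====
-- stated objective: alternative
-- what changed: Replaces per-step negative slicing and re-joining of the tail with a single running suffix string extended by one phoneme per iteration over a counted range, so each n-gram is built incrementally instead of recomputed from scratch.
import Mathlib
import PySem

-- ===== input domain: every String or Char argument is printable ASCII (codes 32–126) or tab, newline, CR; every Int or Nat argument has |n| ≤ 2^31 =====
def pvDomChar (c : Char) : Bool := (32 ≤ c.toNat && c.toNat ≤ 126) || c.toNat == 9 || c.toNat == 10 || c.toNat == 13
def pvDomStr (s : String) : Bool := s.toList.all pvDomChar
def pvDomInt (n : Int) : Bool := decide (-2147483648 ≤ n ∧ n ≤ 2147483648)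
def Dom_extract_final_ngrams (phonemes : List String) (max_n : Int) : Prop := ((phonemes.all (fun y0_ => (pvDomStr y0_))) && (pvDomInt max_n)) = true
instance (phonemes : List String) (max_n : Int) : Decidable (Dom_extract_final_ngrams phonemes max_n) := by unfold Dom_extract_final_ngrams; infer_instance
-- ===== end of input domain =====

-- B replaces A's per-step negative slice + join by a single running suffix string extended
-- by one phoneme per iteration over a counted range (objective: alternative decomposition; same output).

-- ===== PORT A =====
def extract_final_ngrams (phonemes : List String) (max_n : Int) : List String :=
  if phonemes = [] then []
  else
    (PySem.List.pyRange 1 (min (max_n + 1) ((phonemes.length : Int) + 1)) 1).foldl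
      (fun ngrams n =>
        ngrams ++ [PySem.Str.join "" (PySem.List.slice phonemes (some (-n)) none) ++ "$"])
      []

-- ===== PORT B =====
-- the index len-1-i is always in range, so pyGetD's default is never used
def extract_final_ngrams_alt (phonemes : List String) (max_n : Int) : List String :=
  ((PySem.List.pyRange 0 (min max_n (phonemes.length : Int)) 1).foldl
      (fun (st : String × List String) i =>
        let suffix := PySem.List.pyGetD phonemes ((phonemes.length : Int) - 1 - i) "" ++ st.1
        (suffix, st.2 ++ [suffix ++ "$"]))
      ("", [])).2

-- ===== PRECONDITION & SPEC =====
def Spec_extract_final_ngrams (phonemes : List String) (max_n : Int) (out : List String) : Prop := out = extract_final_ngrams_alt phonemes max_n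
instance (phonemes : List String) (max_n : Int) (out : List String) : Decidable (Spec_extract_final_ngrams phonemes max_n out) := by unfold Spec_extract_final_ngrams; infer_instance

-- ===== CLAIM (what is proved, stated in full; the proofs are below) =====
def Claim_equal_extract_final_ngrams : Prop := ∀ (phonemes : List String) (max_n : Int), Dom_extract_final_ngrams phonemes max_n → Spec_extract_final_ngrams phonemes max_n (extract_final_ngrams phonemes max_n)

-- ===== LEMMAS AND PROOFS =====

lemma join_empty_cons (x : String) (l : List String) :
    PySem.Str.join "" (x :: l) = x ++ PySem.Str.join "" l := by
  cases l with
  | nil => simp [PySem.Str.join]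
  | cons b t =>
      simp [PySem.Str.join]
      rw [PySem.Chars.join_cons_cons]
      simp

-- both loops after k iterations: B's state is (running suffix, output) and the output equals A's
lemma loops_eq (ps : List String) (k : Nat) (hk : k ≤ ps.length) :
    (PySem.List.pyRange 0 (k : Int) 1).foldl
        (fun (st : String × List String) i =>
          let suffix := PySem.List.pyGetD ps ((ps.length : Int) - 1 - i) "" ++ st.1
          (suffix, st.2 ++ [suffix ++ "$"])) ("", ([] : List String))
    = (PySem.Str.join "" (ps.drop (ps.length - k)),
       (PySem.List.pyRange 1 ((k : Int) + 1) 1).foldl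
        (fun ngrams n =>
          ngrams ++ [PySem.Str.join "" (PySem.List.slice ps (some (-n)) none) ++ "$"]) []) := by
  induction k with
  | zero =>
      rw [PySem.List.pyRange_one_eq_nil (by omega), PySem.List.pyRange_one_eq_nil (by omega)]
      simp [PySem.Str.join]
  | succ k ih =>
      have hk' : k ≤ ps.length := by omega
      have hcast : ((k + 1 : Nat) : Int) = (k : Int) + 1 := by push_cast; ring
      rw [hcast, PySem.List.pyRange_one_succ_right (by omega),
          PySem.List.pyRange_one_succ_right (by omega) (a := 1) (b := (k : Int) + 1),
          List.foldl_append, List.foldl_append, ih hk']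
      have hidx : (ps.length : Int) - 1 - (k : Int) = ((ps.length - 1 - k : Nat) : Int) := by omega
      have hget : PySem.List.pyGetD ps ((ps.length : Int) - 1 - (k : Int)) "" =
          ps.getD (ps.length - 1 - k) "" := by
        rw [hidx, PySem.List.pyGetD_natCast]
      have hneg : (-((k : Int) + 1)) = -(((k + 1 : Nat)) : Int) := by push_cast; ring
      have hslice : PySem.List.slice ps (some (-((k : Int) + 1))) none
          = ps.drop (ps.length - (k + 1)) := by
        rw [hneg]
        exact PySem.List.slice_from_neg_natCast (xs := ps) (k := k + 1) (by omega)
      have hlt : ps.length - 1 - k < ps.length := by omega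
      have hdrop : ps.drop (ps.length - (k + 1)) =
          ps.getD (ps.length - 1 - k) "" :: ps.drop (ps.length - k) := by
        have h1 : ps.length - (k + 1) = ps.length - 1 - k := by omega
        have h2 : ps.length - 1 - k + 1 = ps.length - k := by omega
        rw [h1, List.drop_eq_getElem_cons hlt, h2, List.getD_eq_getElem ps "" hlt]
      have hsuffix : PySem.Str.join "" (ps.drop (ps.length - (k + 1)))
          = ps.getD (ps.length - 1 - k) "" ++ PySem.Str.join "" (ps.drop (ps.length - k)) := by
        rw [hdrop, join_empty_cons]
      simp only [List.foldl_cons, List.foldl_nil, hget, hslice, hsuffix]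

-- ===== VERDICT (by name: the statement is the Claim_ definition above) =====
theorem extract_final_ngrams_spec : Claim_equal_extract_final_ngrams := by
  intro ps mx _
  unfold Spec_extract_final_ngrams extract_final_ngrams extract_final_ngrams_alt
  by_cases hnil : ps = []
  · subst hnil
    rw [if_pos rfl, show ((List.length ([] : List String)) : Int) = 0 from by simp,
        PySem.List.pyRange_one_eq_nil (by omega)]
    rfl
  · rw [if_neg hnil]
    have hlen : 1 ≤ ps.length := by
      cases ps with
      | nil => exact absurd rfl hnil
      | cons a t => simp
    by_cases hmx : mx ≤ 0
    · rw [PySem.List.pyRange_one_eq_nil (by omega),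
          PySem.List.pyRange_one_eq_nil (by omega)]
      rfl
    · set m : Int := min mx (ps.length : Int) with hm
      have hm0 : 0 < m := by simp only [hm]; omega
      have hmlen : m ≤ (ps.length : Int) := by omega
      have hk : (m.toNat : Int) = m := Int.toNat_of_nonneg (by omega)
      have hkle : m.toNat ≤ ps.length := by omega
      have hmin : min (mx + 1) ((ps.length : Int) + 1) = m + 1 := by omega
      rw [hmin, ← hk, loops_eq ps m.toNat hkle]
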